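-- pv_equiv track=rewrite | github.com/MadCoder39/UnityBuildPipelineiOS | unity_build_pipeline/Services/Fastlane.py | patch_pbx
-- ===== SOURCE A (Python) =====
-- def patch_pbx(content):
--     pbx = content.split("\n")
--     new_pbx = []
--     for i, line in enumerate(pbx):
--         new_pbx.append(line)
--         if "COPY_PHASE_STRIP" in line:
--             new_pbx.append('				CURRENT_PROJECT_VERSION = 0.1;')
--         if "UNITY_SCRIPTING_BACKEND" in line:
--             new_pbx.append('				VERSIONING_SYSTEM = "apple-generic";')
--     return "\n".join(new_pbx)
-- ===== SOURCE B (Python) =====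
-- def _with_insertions(lines, marker, addition):
--     return [part
--             for line in lines
--             for part in ([line, addition] if marker in line else [line])]
--
--
-- def patch_pbx(content):
--     # Two staged passes; VERSIONING_SYSTEM first so that on a line carrying both
--     # markers the second pass inserts CURRENT_PROJECT_VERSION directly after the
--     # line, ahead of the already-inserted VERSIONING_SYSTEM line.
--     lines = content.split("\n")
--     lines = _with_insertions(lines, "UNITY_SCRIPTING_BACKEND",
--                              '				VERSIONING_SYSTEM = "apple-generic";')
--     lines = _with_insertions(lines, "COPY_PHASE_STRIP",
--                              '				CURRENT_PROJECT_VERSION = 0.1;')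
--     return "\n".join(lines)
-- ===== Notes on version B (the rewrite author's own statement) =====
-- stated objective: alternative
-- what changed: Replaces A's single indexed loop that checks both markers per line with two staged insertion passes over the line list: the second pass runs on the output of the first, and the passes are applied in reverse marker order so a line carrying both markers still yields CURRENT_PROJECT_VERSION before VERSIONING_SYSTEM.
import Mathlib
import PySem

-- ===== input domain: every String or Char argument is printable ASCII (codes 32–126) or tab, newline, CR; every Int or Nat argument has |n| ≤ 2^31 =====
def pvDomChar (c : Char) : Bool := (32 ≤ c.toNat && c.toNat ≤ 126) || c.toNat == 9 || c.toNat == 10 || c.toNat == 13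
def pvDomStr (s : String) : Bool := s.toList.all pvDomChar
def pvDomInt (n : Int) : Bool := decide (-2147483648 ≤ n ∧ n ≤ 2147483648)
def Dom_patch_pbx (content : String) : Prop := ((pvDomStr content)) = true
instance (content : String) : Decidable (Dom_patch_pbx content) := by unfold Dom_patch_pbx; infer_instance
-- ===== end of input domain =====

-- B replaces A's single indexed loop (two marker checks per line, shared accumulator)
-- by two staged insertion passes over the line list, applied in reverse marker order
-- so a line carrying both markers still yields its insertions in A's order (objective: alternative).

-- ===== PORT A =====
-- literal port of A: split, enumerate-loop appending to an accumulator list, join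
def patch_pbx (content : String) : String :=
  let pbx := (PySem.Str.split? content "\n").getD []   -- sep "\n" ≠ "", so split? is `some`
  let new_pbx := (PySem.List.enumerate pbx).foldl
    (fun new_pbx (p : Int × String) =>
      let line := p.2
      let new_pbx := new_pbx ++ [line]
      let new_pbx := if PySem.Str.isIn "COPY_PHASE_STRIP" line
        then new_pbx ++ ["\t\t\t\tCURRENT_PROJECT_VERSION = 0.1;"] else new_pbx
      if PySem.Str.isIn "UNITY_SCRIPTING_BACKEND" line
        then new_pbx ++ ["\t\t\t\tVERSIONING_SYSTEM = \"apple-generic\";"] else new_pbx)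
    []
  PySem.Str.join "\n" new_pbx

-- ===== PORT B =====
-- one insertion pass: each line becomes [line, addition] if it contains marker, else [line]
def pvWithInsertions (lines : List String) (marker addition : String) : List String :=
  lines.flatMap (fun line =>
    if PySem.Str.isIn marker line then [line, addition] else [line])

def patch_pbx_alt (content : String) : String :=
  let lines := (PySem.Str.split? content "\n").getD []
  let lines := pvWithInsertions lines "UNITY_SCRIPTING_BACKEND"
    "\t\t\t\tVERSIONING_SYSTEM = \"apple-generic\";"
  let lines := pvWithInsertions lines "COPY_PHASE_STRIP"
    "\t\t\t\tCURRENT_PROJECT_VERSION = 0.1;"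
  PySem.Str.join "\n" lines

-- ===== PRECONDITION & SPEC =====
def Spec_patch_pbx (content : String) (out : String) : Prop := out = patch_pbx_alt content
instance (content : String) (out : String) : Decidable (Spec_patch_pbx content out) := by unfold Spec_patch_pbx; infer_instance

-- ===== CLAIM (what is proved, stated in full; the proofs are below) =====
def Claim_equal_patch_pbx : Prop := ∀ (content : String), Dom_patch_pbx content → Spec_patch_pbx content (patch_pbx content)

-- ===== LEMMAS AND PROOFS =====

-- the group of lines A's loop emits for one input line
def pvChunk (line : String) : List String :=
  line :: ((if PySem.Str.isIn "COPY_PHASE_STRIP" line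
              then ["\t\t\t\tCURRENT_PROJECT_VERSION = 0.1;"] else []) ++
           (if PySem.Str.isIn "UNITY_SCRIPTING_BACKEND" line
              then ["\t\t\t\tVERSIONING_SYSTEM = \"apple-generic\";"] else []))

theorem pvFoldl_eq_flatMap (lines : List (Int × String)) (acc : List String) :
    lines.foldl
      (fun new_pbx (p : Int × String) =>
        let line := p.2
        let new_pbx := new_pbx ++ [line]
        let new_pbx := if PySem.Str.isIn "COPY_PHASE_STRIP" line
          then new_pbx ++ ["\t\t\t\tCURRENT_PROJECT_VERSION = 0.1;"] else new_pbx
        if PySem.Str.isIn "UNITY_SCRIPTING_BACKEND" line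
          then new_pbx ++ ["\t\t\t\tVERSIONING_SYSTEM = \"apple-generic\";"] else new_pbx)
      acc = acc ++ lines.flatMap (fun p => pvChunk p.2) := by
  induction lines generalizing acc with
  | nil => simp
  | cons x xs ih =>
    simp only [List.foldl_cons, List.flatMap_cons, ih, pvChunk]
    split_ifs <;> simp

theorem pvFlatMap_enum (lines : List String) (s : Int) :
    (PySem.List.enumerate lines s).flatMap (fun p => pvChunk p.2) = lines.flatMap pvChunk := by
  induction lines generalizing s with
  | nil => simp [PySem.List.enumerate_nil]
  | cons x xs ih => simp [PySem.List.enumerate_cons, ih]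

-- the VERSIONING_SYSTEM line inserted by B's first pass never matches COPY_PHASE_STRIP
theorem pvVS_no_CPS :
    PySem.Str.isIn "COPY_PHASE_STRIP" "\t\t\t\tVERSIONING_SYSTEM = \"apple-generic\";" = false := by
  decide

-- composing B's two passes on one line recovers A's per-line chunk
theorem pvLine_compose (l : String) :
    ((if PySem.Str.isIn "UNITY_SCRIPTING_BACKEND" l
        then [l, "\t\t\t\tVERSIONING_SYSTEM = \"apple-generic\";"] else [l]).flatMap
      (fun line => if PySem.Str.isIn "COPY_PHASE_STRIP" line
        then [line, "\t\t\t\tCURRENT_PROJECT_VERSION = 0.1;"] else [line]))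
    = pvChunk l := by
  unfold pvChunk
  cases hU : PySem.Str.isIn "UNITY_SCRIPTING_BACKEND" l <;>
    cases hC : PySem.Str.isIn "COPY_PHASE_STRIP" l <;>
      simp only [hU, hC, pvVS_no_CPS, Bool.false_eq_true, if_false, if_true,
        List.flatMap_cons, List.flatMap_nil, List.append_nil, List.nil_append,
        List.cons_append, List.singleton_append]

theorem pvStaged_eq_chunks (lines : List String) :
    pvWithInsertions
      (pvWithInsertions lines "UNITY_SCRIPTING_BACKEND"
        "\t\t\t\tVERSIONING_SYSTEM = \"apple-generic\";")
      "COPY_PHASE_STRIP" "\t\t\t\tCURRENT_PROJECT_VERSION = 0.1;"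
    = lines.flatMap pvChunk := by
  induction lines with
  | nil => rfl
  | cons l rest ih =>
    unfold pvWithInsertions at *
    rw [List.flatMap_cons, List.flatMap_append, ih, List.flatMap_cons, pvLine_compose]

-- ===== VERDICT (by name: the statement is the Claim_ definition above) =====
theorem patch_pbx_spec : Claim_equal_patch_pbx := by
  intro content _
  unfold Spec_patch_pbx patch_pbx patch_pbx_alt
  dsimp only
  rw [pvFoldl_eq_flatMap, pvFlatMap_enum, List.nil_append, pvStaged_eq_chunks]
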